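-- pv_equiv track=rewrite | github.com/Lukerd-29-00/Forest_For_The_Trees | soln.py | cmp_depth_maps
-- ===== SOURCE A (Python) =====
-- def cmp_depth_maps(map_1, map_2):
--     for k in map_1.keys():
--         if k not in map_2.keys() or len(map_1[k]) != len(map_2[k]):
--             return False
--     for k in map_2.keys():
--         if k not in map_1.keys():
--             return False
--     return True
-- ===== SOURCE B (Python) =====
-- def cmp_depth_maps(map_1, map_2):
--     remaining = dict(map_1)
--     for k, v in map_2.items():
--         if k not in remaining or len(remaining.pop(k)) != len(v):
--             return False
--     return not remaining
-- ===== Notes on version B (the rewrite author's own statement) =====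
-- stated objective: alternative
-- what changed: B makes one destructive pass: it pops each key of map_2 out of a mutable copy of map_1 while checking value lengths, and succeeds iff the copy ends up empty; A instead runs two read-only mirror membership loops over the two key views.
import Mathlib
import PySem

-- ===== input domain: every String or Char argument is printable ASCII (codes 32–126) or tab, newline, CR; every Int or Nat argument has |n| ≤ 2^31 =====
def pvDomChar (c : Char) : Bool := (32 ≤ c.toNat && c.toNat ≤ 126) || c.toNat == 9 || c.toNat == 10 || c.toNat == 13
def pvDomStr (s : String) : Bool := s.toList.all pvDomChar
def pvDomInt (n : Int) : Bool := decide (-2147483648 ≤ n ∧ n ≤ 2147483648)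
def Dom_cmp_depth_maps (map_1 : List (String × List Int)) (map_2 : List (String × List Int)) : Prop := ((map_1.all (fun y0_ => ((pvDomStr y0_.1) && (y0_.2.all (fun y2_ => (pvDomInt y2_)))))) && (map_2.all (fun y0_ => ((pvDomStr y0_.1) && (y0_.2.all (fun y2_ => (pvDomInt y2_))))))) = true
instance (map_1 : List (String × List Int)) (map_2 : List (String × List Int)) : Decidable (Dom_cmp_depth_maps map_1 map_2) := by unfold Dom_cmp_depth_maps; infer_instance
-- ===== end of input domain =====

-- B replaces A's two read-only mirror membership loops by one destructive pass that pops
-- each key of map_2 out of a copy of map_1 and succeeds iff the copy ends empty ('alternative').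

-- ===== PORT A =====
-- second loop of A: 'for k in map_2.keys(): if k not in map_1.keys(): return False'
def cmpLoop2 (d1 : PySem.Dict String (List Int)) :
    List (String × List Int) → Bool
  | [] => true
  | (k, _) :: rest => if !(d1.contains k) then false else cmpLoop2 d1 rest

-- first loop of A: 'for k in map_1.keys(): if k not in map_2.keys() or len(map_1[k]) != len(map_2[k]): return False'
-- (k is a key of map_1, so map_1[k] is the item's own value v)
def cmpLoop1 (d1 d2 : PySem.Dict String (List Int)) :
    List (String × List Int) → Bool
  | [] => cmpLoop2 d1 d2.items
  | (k, v) :: rest =>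
      if !(d2.contains k) || !(v.length == (d2.getD k []).length) then false
      else cmpLoop1 d1 d2 rest

def cmp_depth_maps (map_1 : List (String × List Int)) (map_2 : List (String × List Int)) : Bool :=
  let d1 := PySem.Dict.ofList map_1
  let d2 := PySem.Dict.ofList map_2
  cmpLoop1 d1 d2 d1.items

-- ===== PORT B =====
-- 'for k, v in map_2.items(): if k not in remaining or len(remaining.pop(k)) != len(v): return False'
-- then 'return not remaining'; remaining.pop(k) = read remaining[k], erase key k.
def cmpAltLoop (remaining : PySem.Dict String (List Int)) :
    List (String × List Int) → Bool
  | [] => remaining.size == 0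
  | (k, v) :: rest =>
      if !(remaining.contains k) then false
      else
        let popped := remaining.getD k []
        let remaining' := remaining.erase k
        if !(popped.length == v.length) then false
        else cmpAltLoop remaining' rest

def cmp_depth_maps_alt (map_1 : List (String × List Int)) (map_2 : List (String × List Int)) : Bool :=
  let remaining := PySem.Dict.ofList map_1
  cmpAltLoop remaining (PySem.Dict.ofList map_2).items

-- ===== PRECONDITION & SPEC =====
def Spec_cmp_depth_maps (map_1 : List (String × List Int)) (map_2 : List (String × List Int)) (out : Bool) : Prop := out = cmp_depth_maps_alt map_1 map_2
instance (map_1 : List (String × List Int)) (map_2 : List (String × List Int)) (out : Bool) : Decidable (Spec_cmp_depth_maps map_1 map_2 out) := by unfold Spec_cmp_depth_maps; infer_instance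

-- ===== CLAIM (what is proved, stated in full; the proofs are below) =====
def Claim_equal_cmp_depth_maps : Prop := ∀ (map_1 : List (String × List Int)) (map_2 : List (String × List Int)), Dom_cmp_depth_maps map_1 map_2 → Spec_cmp_depth_maps map_1 map_2 (cmp_depth_maps map_1 map_2)

-- ===== LEMMAS AND PROOFS =====

-- A's two loops, propositionally
theorem cmpLoop2_iff (d1 : PySem.Dict String (List Int)) (l : List (String × List Int)) :
    cmpLoop2 d1 l = true ↔ ∀ kv ∈ l, d1.contains kv.1 = true := by
  induction l with
  | nil => simp [cmpLoop2]
  | cons kv rest ih =>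
      obtain ⟨k, v⟩ := kv
      simp only [cmpLoop2]
      cases hc : d1.contains k <;> simp [ih, hc]

theorem cmpLoop1_iff (d1 d2 : PySem.Dict String (List Int)) (l : List (String × List Int)) :
    cmpLoop1 d1 d2 l = true ↔
      ((∀ kv ∈ l, d2.contains kv.1 = true ∧ kv.2.length = (d2.getD kv.1 []).length) ∧
       (∀ kv ∈ d2.items, d1.contains kv.1 = true)) := by
  induction l with
  | nil => simp [cmpLoop1, cmpLoop2_iff]
  | cons kv rest ih =>
      obtain ⟨k, v⟩ := kv
      simp only [cmpLoop1]
      cases hc : d2.contains k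
      · simp [hc]
      · by_cases hlen : v.length = (d2.getD k []).length
        · simp [hc, hlen, ih]
        · simp [hc, hlen]

-- find? over the erase-filter, for a key different from the erased one
theorem find?_filter_ne (l : List (String × List Int)) (k k' : String) (h : k' ≠ k) :
    (l.filter (fun p => !(p.1 == k))).find? (fun p => p.1 == k') =
      l.find? (fun p => p.1 == k') := by
  induction l with
  | nil => rfl
  | cons a t ih =>
      by_cases ha : a.1 = k
      · have hq : ¬((a.1 == k') = true) := by simp [ha]; exact fun hh => h hh.symm
        rw [List.filter_cons_of_neg (by simp [ha]), ih]
        exact (List.find?_cons_of_neg (p := fun p : String × List Int => p.1 == k') hq).symm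
      · by_cases ha' : a.1 = k'
        · rw [List.filter_cons_of_pos (by simp [ha]),
            List.find?_cons_of_pos (by simp [ha']), List.find?_cons_of_pos (by simp [ha'])]
        · rw [List.filter_cons_of_pos (by simp [ha]),
            List.find?_cons_of_neg (by simp [ha']), List.find?_cons_of_neg (by simp [ha']), ih]

theorem erase_getD_of_ne (d : PySem.Dict String (List Int)) (k k' : String) (h : k' ≠ k) :
    (d.erase k).getD k' [] = d.getD k' [] := by
  simp only [PySem.Dict.getD, PySem.Dict.get?, PySem.Dict.erase]
  rw [find?_filter_ne d.items k k' h]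

theorem erase_contains_of_ne (d : PySem.Dict String (List Int)) (k k' : String) (h : k' ≠ k) :
    (d.erase k).contains k' = d.contains k' := by
  simp only [PySem.Dict.contains, PySem.Dict.erase, List.any_filter]
  refine List.any_congr rfl (fun p => ?_)
  by_cases hp : p.1 = k' <;> simp [hp, h]

theorem erase_keys (d : PySem.Dict String (List Int)) (k : String) :
    (d.erase k).keys = d.keys.filter (fun j => !(j == k)) := by
  simp only [PySem.Dict.keys, PySem.Dict.erase]
  induction d.items with
  | nil => rfl
  | cons a t ih => by_cases ha : a.1 = k <;> simp [ha, ih]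

-- B's loop, propositionally: the processed items all match in 'remaining', and every
-- remaining key gets consumed
theorem cmpAltLoop_iff (r : PySem.Dict String (List Int)) (l : List (String × List Int))
    (hl : (l.map Prod.fst).Nodup) :
    cmpAltLoop r l = true ↔
      ((∀ kv ∈ l, r.contains kv.1 = true ∧ (r.getD kv.1 []).length = kv.2.length) ∧
       (∀ j ∈ r.keys, j ∈ l.map Prod.fst)) := by
  induction l generalizing r with
  | nil =>
      simp only [cmpAltLoop, PySem.Dict.size, PySem.Dict.keys]
      cases h : r.items with
      | nil => simp
      | cons a t =>
          simp only [List.map_cons, List.map_nil]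
          constructor
          · intro hfalse; simp at hfalse
          · rintro ⟨-, h2⟩
            exact absurd (h2 a.1 (List.mem_cons_self)) (List.not_mem_nil)
  | cons kv rest ih =>
      obtain ⟨k, v⟩ := kv
      simp only [List.map_cons, List.nodup_cons] at hl
      obtain ⟨hknotin, hrest⟩ := hl
      cases hc : r.contains k
      · have hstep : cmpAltLoop r ((k, v) :: rest) = false := by simp [cmpAltLoop, hc]
        rw [hstep]
        simp only [Bool.false_eq_true, false_iff]
        intro ⟨h1, _⟩
        exact absurd (h1 (k, v) List.mem_cons_self).1 (by simp [hc])
      · by_cases hlen : (r.getD k []).length = v.length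
        · have hstep : cmpAltLoop r ((k, v) :: rest) = cmpAltLoop (r.erase k) rest := by
            simp [cmpAltLoop, hc, hlen]
          rw [hstep, ih _ hrest]
          constructor
          · rintro ⟨h1, h2⟩
            refine ⟨?_, ?_⟩
            · intro kv hkv
              rcases List.mem_cons.mp hkv with heq | hmem
              · subst heq; exact ⟨hc, hlen⟩
              · have hne : kv.1 ≠ k := fun he => hknotin (he ▸ List.mem_map_of_mem hmem)
                have := h1 kv hmem
                rwa [erase_contains_of_ne r k kv.1 hne, erase_getD_of_ne r k kv.1 hne] at this
            · intro j hj
              by_cases hjk : j = k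
              · simp [hjk]
              · have hj' : j ∈ (r.erase k).keys := by
                  rw [erase_keys]; exact List.mem_filter.mpr ⟨hj, by simp [hjk]⟩
                simp only [List.map_cons, List.mem_cons]
                right; exact h2 j hj'
          · rintro ⟨h1, h2⟩
            refine ⟨?_, ?_⟩
            · intro kv hkv
              have hmem : kv ∈ (k, v) :: rest := List.mem_cons_of_mem _ hkv
              have hne : kv.1 ≠ k := fun he => hknotin (he ▸ List.mem_map_of_mem hkv)
              have := h1 kv hmem
              rwa [erase_contains_of_ne r k kv.1 hne, erase_getD_of_ne r k kv.1 hne]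
            · intro j hj
              rw [erase_keys] at hj
              obtain ⟨hjr, hjk⟩ := List.mem_filter.mp hj
              have hjk' : j ≠ k := by simpa using hjk
              rcases List.mem_cons.mp (h2 j hjr) with heq | hmem
              · exact absurd heq hjk'
              · exact hmem
        · have hstep : cmpAltLoop r ((k, v) :: rest) = false := by
            simp [cmpAltLoop, hc, hlen]
          rw [hstep]
          simp only [Bool.false_eq_true, false_iff]
          intro ⟨h1, _⟩
          exact hlen (h1 (k, v) List.mem_cons_self).2

-- a key of a Nodup-keyed dict comes with its item
theorem exists_item_of_mem_keys (d : PySem.Dict String (List Int)) (k : String)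
    (h : k ∈ d.keys) : ∃ v, (k, v) ∈ d.items := by
  simp only [PySem.Dict.keys, List.mem_map] at h
  obtain ⟨⟨k', v⟩, hmem, hk⟩ := h
  have hk' : k' = k := hk
  exact ⟨v, hk' ▸ hmem⟩

-- ===== VERDICT (by name: the statement is the Claim_ definition above) =====
theorem cmp_depth_maps_spec : Claim_equal_cmp_depth_maps := by
  intro map_1 map_2 _
  unfold Spec_cmp_depth_maps cmp_depth_maps cmp_depth_maps_alt
  dsimp only
  set d1 := PySem.Dict.ofList map_1 with hd1
  set d2 := PySem.Dict.ofList map_2 with hd2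
  have hn1 : d1.keys.Nodup := PySem.Dict.nodup_keys_ofList map_1
  have hn2 : d2.keys.Nodup := PySem.Dict.nodup_keys_ofList map_2
  have hkeys2 : d2.items.map Prod.fst = d2.keys := rfl
  rw [Bool.eq_iff_iff, cmpLoop1_iff, cmpAltLoop_iff d1 d2.items (by rw [hkeys2]; exact hn2)]
  rw [hkeys2]
  constructor
  · rintro ⟨h1, h2⟩
    refine ⟨?_, ?_⟩
    · rintro ⟨k, v⟩ hkv
      refine ⟨h2 (k, v) hkv, ?_⟩
      have hk1 : k ∈ d1.keys := (PySem.Dict.contains_iff_mem_keys d1 k).mp (h2 (k, v) hkv)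
      obtain ⟨v1, hv1⟩ := exists_item_of_mem_keys d1 k hk1
      have hg1 : d1.getD k [] = v1 := PySem.Dict.getD_of_mem_items d1 hv1 hn1 []
      have hg2 : d2.getD k [] = v := PySem.Dict.getD_of_mem_items d2 hkv hn2 []
      have hlen := (h1 (k, v1) hv1).2
      simp only at hlen ⊢
      rw [hg1, hlen, hg2]
    · intro j hj
      obtain ⟨v1, hv1⟩ := exists_item_of_mem_keys d1 j hj
      exact (PySem.Dict.contains_iff_mem_keys d2 j).mp (h1 (j, v1) hv1).1
  · rintro ⟨h1, h2⟩
    refine ⟨?_, ?_⟩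
    · rintro ⟨k, v⟩ hkv
      have hk1 : k ∈ d1.keys := by
        simpa [PySem.Dict.keys] using List.mem_map_of_mem (f := fun x => x.1) hkv
      have hk2 : k ∈ d2.keys := h2 k hk1
      refine ⟨(PySem.Dict.contains_iff_mem_keys d2 k).mpr hk2, ?_⟩
      obtain ⟨v2, hv2⟩ := exists_item_of_mem_keys d2 k hk2
      have hg1 : d1.getD k [] = v := PySem.Dict.getD_of_mem_items d1 hkv hn1 []
      have hg2 : d2.getD k [] = v2 := PySem.Dict.getD_of_mem_items d2 hv2 hn2 []
      have hlen := (h1 (k, v2) hv2).2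
      simp only at hlen ⊢
      rw [hg2, ← hlen, hg1]
    · intro kv hkv
      exact (h1 kv hkv).1
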